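-- pv_equiv track=rewrite | github.com/ga87tuz/word_ladders_game | src/word_ladders.py | wordsHaveSameLetters
-- ===== SOURCE A (Python) =====
-- def wordsHaveSameLetters(parentWord, childWord, nrLettersToBeSame):
--     nrSameLetters =0
--     for character in parentWord:
--         if character in childWord:
--             nrSameLetters=nrSameLetters+1
--             childWord = childWord.replace(character,'',1)
--             #str.replace(childWord, character, 1)
--     if nrSameLetters >=(nrLettersToBeSame):
--         return True
--     else:
--         return False
-- ===== SOURCE B (Python) =====
-- def wordsHaveSameLetters(parentWord, childWord, nrLettersToBeSame):
--     p = sorted(parentWord)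
--     q = sorted(childWord)
--     i = j = common = 0
--     while i < len(p) and j < len(q):
--         if p[i] == q[j]:
--             common += 1
--             i += 1
--             j += 1
--         elif p[i] < q[j]:
--             i += 1
--         else:
--             j += 1
--     return common >= nrLettersToBeSame
-- ===== Notes on version B (the rewrite author's own statement) =====
-- stated objective: faster
-- what changed: Replaces A's per-character substring-membership test plus one-at-a-time string replace with sorting both words and a single two-pointer merge that counts the multiset intersection.
import Mathlib
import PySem

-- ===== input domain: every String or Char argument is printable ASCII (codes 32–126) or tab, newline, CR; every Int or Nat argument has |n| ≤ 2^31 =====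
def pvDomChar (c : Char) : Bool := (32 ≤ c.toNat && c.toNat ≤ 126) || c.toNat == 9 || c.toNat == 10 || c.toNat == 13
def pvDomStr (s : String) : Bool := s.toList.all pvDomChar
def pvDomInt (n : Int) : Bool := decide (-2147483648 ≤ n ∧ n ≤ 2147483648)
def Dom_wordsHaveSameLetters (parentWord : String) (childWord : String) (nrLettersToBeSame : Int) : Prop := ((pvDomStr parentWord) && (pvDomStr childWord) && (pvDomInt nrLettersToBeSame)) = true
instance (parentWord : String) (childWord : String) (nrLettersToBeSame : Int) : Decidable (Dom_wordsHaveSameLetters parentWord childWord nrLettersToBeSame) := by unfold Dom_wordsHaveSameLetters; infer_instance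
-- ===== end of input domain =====

-- B replaces A's membership-scan-plus-replace loop with sort both words and one two-pointer merge (alternative decomposition; return value only, neither mutates its arguments).

-- ===== PORT A =====
-- childWord.replace(character, '', 1) for a single character: remove the first
-- occurrence of that character (exact for a 1-char pattern and empty replacement, count 1).
def pvRemoveFirst : List Char → Char → List Char
  | [], _ => []
  | x :: xs, c => if x = c then xs else x :: pvRemoveFirst xs c

def wordsHaveSameLetters (parentWord : String) (childWord : String) (nrLettersToBeSame : Int) : Bool :=
  -- 'character in childWord' for a 1-char string is a list membership test (exact)
  let st := parentWord.toList.foldl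
    (fun (st : Int × List Char) character =>
      if st.2.contains character then (st.1 + 1, pvRemoveFirst st.2 character) else st)
    (0, childWord.toList)
  if nrLettersToBeSame ≤ st.1 then true else false

-- ===== PORT B =====
def pvMergeCount : List Char → List Char → Nat
  | [], _ => 0
  | _ :: _, [] => 0
  | a :: xs, b :: ys =>
    if a = b then pvMergeCount xs ys + 1
    else if a < b then pvMergeCount xs (b :: ys)
    else pvMergeCount (a :: xs) ys
termination_by xs ys => xs.length + ys.length
decreasing_by all_goals (simp [List.length_cons]; try omega)

def wordsHaveSameLetters_alt (parentWord : String) (childWord : String) (nrLettersToBeSame : Int) : Bool :=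
  let p := PySem.List.sorted parentWord.toList (fun x => x) false
  let q := PySem.List.sorted childWord.toList (fun x => x) false
  decide (nrLettersToBeSame ≤ (pvMergeCount p q : Int))

-- ===== PRECONDITION & SPEC =====
def Spec_wordsHaveSameLetters (parentWord : String) (childWord : String) (nrLettersToBeSame : Int) (out : Bool) : Prop := out = wordsHaveSameLetters_alt parentWord childWord nrLettersToBeSame
instance (parentWord : String) (childWord : String) (nrLettersToBeSame : Int) (out : Bool) : Decidable (Spec_wordsHaveSameLetters parentWord childWord nrLettersToBeSame out) := by unfold Spec_wordsHaveSameLetters; infer_instance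

-- ===== CLAIM (what is proved, stated in full; the proofs are below) =====
def Claim_equal_wordsHaveSameLetters : Prop := ∀ (parentWord : String) (childWord : String) (nrLettersToBeSame : Int), Dom_wordsHaveSameLetters parentWord childWord nrLettersToBeSame → Spec_wordsHaveSameLetters parentWord childWord nrLettersToBeSame (wordsHaveSameLetters parentWord childWord nrLettersToBeSame)

-- ===== LEMMAS AND PROOFS =====

theorem pvRemoveFirst_eq_erase (l : List Char) (c : Char) : pvRemoveFirst l c = l.erase c := by
  induction l with
  | nil => rfl
  | cons x xs ih =>
    simp [pvRemoveFirst, List.erase_cons]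
    by_cases h : x = c <;> simp [h, ih]

-- A's loop accumulates the size of the multiset intersection
theorem foldA_eq (p : List Char) (c : List Char) (acc : Int) :
    (p.foldl (fun (st : Int × List Char) character =>
      if st.2.contains character then (st.1 + 1, pvRemoveFirst st.2 character) else st)
      (acc, c)).1 = acc + (((p : Multiset Char) ∩ (c : Multiset Char)).card : Int) := by
  induction p generalizing c acc with
  | nil => simp
  | cons a ps ih =>
    by_cases h : a ∈ c
    · have hc : c.contains a = true := by simpa using h
      rw [List.foldl_cons, if_pos hc, ih, pvRemoveFirst_eq_erase]
      have : ((a :: ps : List Char) : Multiset Char) ∩ (c : Multiset Char)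
          = a ::ₘ ((ps : Multiset Char) ∩ ((c.erase a : List Char) : Multiset Char)) := by
        rw [show ((a :: ps : List Char) : Multiset Char) = a ::ₘ (ps : Multiset Char) from rfl,
          Multiset.cons_inter_of_pos _ (by simpa using h), Multiset.coe_erase]
      rw [this]
      simp
      omega
    · have hc : ¬ (c.contains a = true) := by simpa using h
      rw [List.foldl_cons, if_neg hc, ih]
      congr 2
      rw [show ((a :: ps : List Char) : Multiset Char) = a ::ₘ (ps : Multiset Char) from rfl,
        Multiset.cons_inter_of_neg _ (by simpa using h)]

-- B's merge on sorted lists counts the multiset intersection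
theorem pvMergeCount_eq : ∀ (xs ys : List Char),
    xs.Pairwise (· ≤ ·) → ys.Pairwise (· ≤ ·) →
    pvMergeCount xs ys = ((xs : Multiset Char) ∩ (ys : Multiset Char)).card
  | [], ys, _, _ => by simp [pvMergeCount]
  | _ :: _, [], _, _ => by simp [pvMergeCount]
  | a :: xs, b :: ys, hx, hy => by
    rw [pvMergeCount]
    by_cases hab : a = b
    · subst hab
      rw [if_pos rfl]
      rw [pvMergeCount_eq xs ys (List.Pairwise.of_cons hx) (List.Pairwise.of_cons hy)]
      rw [show ((a :: xs : List Char) : Multiset Char) = a ::ₘ (xs : Multiset Char) from rfl,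
        Multiset.cons_inter_of_pos _ (by simp)]
      simp
    · rw [if_neg hab]
      by_cases hlt : a < b
      · rw [if_pos hlt]
        rw [pvMergeCount_eq xs (b :: ys) (List.Pairwise.of_cons hx) hy]
        have hnot : a ∉ ((b :: ys : List Char) : Multiset Char) := by
          rw [Multiset.mem_coe, List.mem_cons]
          rintro (rfl | hmem)
          · exact hab rfl
          · have := (List.pairwise_cons.mp hy).1 a hmem
            exact absurd (lt_of_lt_of_le hlt this) (lt_irrefl a)
        rw [show ((a :: xs : List Char) : Multiset Char) = a ::ₘ (xs : Multiset Char) from rfl,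
          Multiset.cons_inter_of_neg _ hnot]
      · rw [if_neg hlt]
        have hblt : b < a := lt_of_le_of_ne (not_lt.mp hlt) (Ne.symm hab)
        have hnot : b ∉ ((a :: xs : List Char) : Multiset Char) := by
          rw [Multiset.mem_coe, List.mem_cons]
          rintro (rfl | hmem)
          · exact hab rfl
          · have := (List.pairwise_cons.mp hx).1 b hmem
            exact absurd (lt_of_lt_of_le hblt this) (lt_irrefl b)
        have key : ((a :: xs : List Char) : Multiset Char) ∩ ((b :: ys : List Char) : Multiset Char)
            = ((a :: xs : List Char) : Multiset Char) ∩ (ys : Multiset Char) := by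
          rw [Multiset.inter_comm,
            show ((b :: ys : List Char) : Multiset Char) = b ::ₘ (ys : Multiset Char) from rfl,
            Multiset.cons_inter_of_neg _ hnot, Multiset.inter_comm]
        rw [pvMergeCount_eq (a :: xs) ys hx (List.Pairwise.of_cons hy), key]
termination_by xs ys => xs.length + ys.length
decreasing_by all_goals (simp [List.length_cons]; try omega)

-- ===== VERDICT (by name: the statement is the Claim_ definition above) =====
theorem wordsHaveSameLetters_spec : Claim_equal_wordsHaveSameLetters := by
  intro p c n _
  unfold Spec_wordsHaveSameLetters wordsHaveSameLetters wordsHaveSameLetters_alt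
  have hA := foldA_eq p.toList c.toList 0
  have hB := pvMergeCount_eq (PySem.List.sorted p.toList (fun x => x) false)
    (PySem.List.sorted c.toList (fun x => x) false)
    (PySem.List.sorted_pairwise ..) (PySem.List.sorted_pairwise ..)
  have hp : ((PySem.List.sorted p.toList (fun x => x) false : List Char) : Multiset Char) = (p.toList : Multiset Char) :=
    Multiset.coe_eq_coe.mpr (PySem.List.sorted_perm ..)
  have hc : ((PySem.List.sorted c.toList (fun x => x) false : List Char) : Multiset Char) = (c.toList : Multiset Char) :=
    Multiset.coe_eq_coe.mpr (PySem.List.sorted_perm ..)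
  simp only [hA, hB, hp, hc, zero_add]
  simp
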